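-- pv_equiv track=rewrite | github.com/kanpachi1/LR-RNN | lrrnn/metrics.py | get_min_max_level
-- ===== SOURCE A (Python) =====
-- def get_min_max_level(sentences):
--     """Get the minimum and maximum number of morpheme information.
--
--     Args:
--         sentences (list of list of list of str): List of sentences.
--             Each sentence is a list of morphs.
--             Each morph is a list of morpheme information.
--     Returns:
--         tuple[int, int]: Minimum and maximum number of morpheme information.
--     """
--     max_number_of_morpheme_information = float("-inf")
--     min_number_of_morpheme_information = float("inf")
--
--     for sentence in sentences:
--         for morph in sentence:
--             max_number_of_morpheme_information = max(
--                 max_number_of_morpheme_information, len(morph)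
--             )
--             min_number_of_morpheme_information = min(
--                 min_number_of_morpheme_information, len(morph)
--             )
--
--     min_level = min_number_of_morpheme_information - 1
--     max_level = max_number_of_morpheme_information - 1
--     return (min_level, max_level)
-- ===== SOURCE B (Python) =====
-- def get_min_max_level(sentences):
--     lengths = sorted(len(morph) for sentence in sentences for morph in sentence)
--     return (lengths[0] - 1, lengths[-1] - 1)
-- ===== Notes on version B (the rewrite author's own statement) =====
-- stated objective: alternative
-- what changed: Replaces the fused running-min/max accumulator loop with sort-then-pick-endpoints: sort all morph lengths once and read the minimum at index 0 and the maximum at index -1; Pre_ excludes inputs with no morphs, where A returns the float pair (inf, -inf) instead of an int pair and B raises IndexError.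
-- outside the precondition, e.g. on get_min_max_level([]): A returns (inf, -inf), B raises IndexError; on get_min_max_level([[]]): A returns (inf, -inf), B raises IndexError
import Mathlib
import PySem

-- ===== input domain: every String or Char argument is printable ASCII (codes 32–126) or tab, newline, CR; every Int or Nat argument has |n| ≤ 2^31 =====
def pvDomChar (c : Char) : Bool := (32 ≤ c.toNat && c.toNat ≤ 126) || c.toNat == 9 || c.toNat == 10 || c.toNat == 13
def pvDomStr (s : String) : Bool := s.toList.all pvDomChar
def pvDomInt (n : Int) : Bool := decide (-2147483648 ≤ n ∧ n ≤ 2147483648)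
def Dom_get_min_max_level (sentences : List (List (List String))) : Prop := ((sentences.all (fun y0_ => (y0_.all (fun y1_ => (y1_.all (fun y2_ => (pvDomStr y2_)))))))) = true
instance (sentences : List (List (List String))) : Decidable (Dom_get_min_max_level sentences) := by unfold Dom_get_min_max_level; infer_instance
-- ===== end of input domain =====

-- B replaces A's fused running-min/max loop with sort-then-pick-endpoints (sort all morph lengths, read index 0 and -1); equal on every input containing at least one morph.


-- ===== PORT A =====
-- The float sentinels -inf/inf are modelled by `none`; after the first morph the state
-- is a Python int, modelled `some`.  The `.getD 0` branches are unreachable under Pre_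
-- (they correspond to A returning the float pair (inf, -inf)).
def get_min_max_level (sentences : List (List (List String))) : Int × Int :=
  let st := sentences.foldl
    (fun (st : Option Int × Option Int) sentence =>
      sentence.foldl
        (fun (st : Option Int × Option Int) morph =>
          (some (match st.1 with
                 | none => (morph.length : Int)
                 | some m => max m (morph.length : Int)),
           some (match st.2 with
                 | none => (morph.length : Int)
                 | some m => min m (morph.length : Int))))
        st)
    ((none : Option Int), (none : Option Int))
  ((st.2.getD 0) - 1, (st.1.getD 0) - 1)

-- ===== PORT B =====
-- sorted(...) is PySem.List.sorted; lengths[0] / lengths[-1] are pyGetD (in range under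
-- Pre_, where the list is nonempty; on the empty list Python raises IndexError, excluded).
def get_min_max_level_alt (sentences : List (List (List String))) : Int × Int :=
  let lengths := PySem.List.sorted
    (sentences.flatMap (fun sentence => sentence.map (fun morph => (morph.length : Int))))
    (fun x => x) false
  (PySem.List.pyGetD lengths 0 0 - 1, PySem.List.pyGetD lengths (-1) 0 - 1)

-- ===== PRECONDITION & SPEC =====
-- Pre_ excludes inputs with no morphs at all: there A returns the float pair (inf, -inf),
-- not a pair of ints, and B raises IndexError.
def Pre_get_min_max_level (sentences : List (List (List String))) : Prop :=
  sentences.flatMap (fun s => s) ≠ []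
instance (sentences : List (List (List String))) : Decidable (Pre_get_min_max_level sentences) := by unfold Pre_get_min_max_level; infer_instance
def pvWitness_get_min_max_level : List (List (List String)) := [[["a", "b"], ["c"]]]
def Spec_get_min_max_level (sentences : List (List (List String))) (out : Int × Int) : Prop := out = get_min_max_level_alt sentences
instance (sentences : List (List (List String))) (out : Int × Int) : Decidable (Spec_get_min_max_level sentences out) := by unfold Spec_get_min_max_level; infer_instance

-- ===== CLAIM =====
def Claim_equal_get_min_max_level : Prop := ∀ (sentences : List (List (List String))), Dom_get_min_max_level sentences → Pre_get_min_max_level sentences → Spec_get_min_max_level sentences (get_min_max_level sentences)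

-- ===== LEMMAS AND PROOFS =====

-- A's per-morph update, seen as a function of the morph's length only.
def pvStep (st : Option Int × Option Int) (l : Int) : Option Int × Option Int :=
  (some (match st.1 with | none => l | some m => max m l),
   some (match st.2 with | none => l | some m => min m l))

lemma inner_eq (sentence : List (List String)) (st : Option Int × Option Int) :
    sentence.foldl
        (fun (st : Option Int × Option Int) morph =>
          (some (match st.1 with
                 | none => (morph.length : Int)
                 | some m => max m (morph.length : Int)),
           some (match st.2 with
                 | none => (morph.length : Int)
                 | some m => min m (morph.length : Int))))
        st
      = (sentence.map (fun morph => (morph.length : Int))).foldl pvStep st := by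
  induction sentence generalizing st with
  | nil => rfl
  | cons m t ih => simp [List.foldl, ih, pvStep]

lemma outer_eq (sentences : List (List (List String))) (st : Option Int × Option Int) :
    sentences.foldl
      (fun (st : Option Int × Option Int) sentence =>
        sentence.foldl
          (fun (st : Option Int × Option Int) morph =>
            (some (match st.1 with
                   | none => (morph.length : Int)
                   | some m => max m (morph.length : Int)),
             some (match st.2 with
                   | none => (morph.length : Int)
                   | some m => min m (morph.length : Int))))
          st)
      st
      = (sentences.flatMap (fun sentence => sentence.map (fun morph => (morph.length : Int)))).foldl pvStep st := by
  induction sentences generalizing st with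
  | nil => rfl
  | cons s t ih =>
      rw [List.foldl_cons, ih, inner_eq]
      simp [List.foldl_append]

lemma foldl_step_some (t : List Int) (a b : Int) :
    t.foldl pvStep (some a, some b) = (some (t.foldl max a), some (t.foldl min b)) := by
  induction t generalizing a b with
  | nil => rfl
  | cons x xs ih => simp [List.foldl, pvStep, ih]

lemma foldl_step_none (L : List Int) (hL : L ≠ []) :
    L.foldl pvStep (none, none)
      = (PySem.List.max? L (fun x => x), PySem.List.min? L (fun x => x)) := by
  cases L with
  | nil => exact absurd rfl hL
  | cons x t =>
      simp [List.foldl, pvStep, foldl_step_some, PySem.List.max?_id_cons, PySem.List.min?_id_cons]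

-- In a ≤-pairwise list the last element is an upper bound.
lemma pairwise_le_getLast (S : List Int) (hS : S ≠ []) (hp : S.Pairwise (· ≤ ·)) :
    ∀ y ∈ S, y ≤ S.getLast hS := by
  induction S with
  | nil => exact absurd rfl hS
  | cons a t ih =>
      intro y hy
      cases t with
      | nil => simp at hy; simp [hy]
      | cons b u =>
          rw [List.getLast_cons (by simp)]
          rcases List.mem_cons.1 hy with rfl | hyt
          · have hlast : (b :: u).getLast (by simp) ∈ b :: u := List.getLast_mem _
            exact (List.pairwise_cons.1 hp).1 _ hlast
          · exact ih (by simp) (List.pairwise_cons.1 hp).2 y hyt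

-- Endpoints of the sorted list are min? and max?.
lemma sorted_head_eq_min? (L : List Int) (hL : L ≠ []) (m : Int) (ts : List Int)
    (hSdef : PySem.List.sorted L (fun x => x) false = m :: ts) :
    m = (PySem.List.min? L (fun x => x)).getD 0 := by
  obtain ⟨mn, hmn⟩ : ∃ mn, PySem.List.min? L (fun x : Int => x) = some mn := by
    cases h : PySem.List.min? L (fun x : Int => x) with
    | none => exact absurd ((PySem.List.min?_eq_none_iff L (fun x : Int => x)).1 h) hL
    | some mn => exact ⟨mn, rfl⟩
  have hmem := PySem.List.min?_mem hmn
  have hmin := PySem.List.min?_isMin hmn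
  have hmle := PySem.List.key_head_sorted_le (xs := L) (key := fun x : Int => x) hSdef
  have hmL : m ∈ L := by
    have : m ∈ PySem.List.sorted L (fun x : Int => x) false := by simp [hSdef]
    exact (PySem.List.mem_sorted L (fun x : Int => x) false m).1 this
  have h1 : mn ≤ m := hmin m hmL
  have h2 : m ≤ mn := hmle mn hmem
  simp [hmn, le_antisymm h2 h1]

lemma sorted_last_eq_max? (L : List Int) (hL : L ≠ []) (hS : PySem.List.sorted L (fun x => x) false ≠ []) :
    (PySem.List.sorted L (fun x => x) false).getLast hS
      = (PySem.List.max? L (fun x => x)).getD 0 := by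
  have hperm := PySem.List.sorted_perm L (fun x : Int => x) false
  obtain ⟨mx, hmx⟩ : ∃ mx, PySem.List.max? L (fun x : Int => x) = some mx := by
    cases h : PySem.List.max? L (fun x : Int => x) with
    | none => exact absurd ((PySem.List.max?_eq_none_iff L (fun x : Int => x)).1 h) hL
    | some mx => exact ⟨mx, rfl⟩
  have hmem := PySem.List.max?_mem hmx
  have hmax := PySem.List.max?_isMax hmx
  have hpair : (PySem.List.sorted L (fun x : Int => x) false).Pairwise (· ≤ ·) := by
    simpa using PySem.List.sorted_pairwise (xs := L) (key := fun x : Int => x)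
  have hlastmem : (PySem.List.sorted L (fun x : Int => x) false).getLast hS ∈ L :=
    (PySem.List.mem_sorted L (fun x : Int => x) false _).1 (List.getLast_mem hS)
  have hmxS : mx ∈ PySem.List.sorted L (fun x : Int => x) false :=
    (PySem.List.mem_sorted L (fun x : Int => x) false mx).2 hmem
  have h1 : mx ≤ (PySem.List.sorted L (fun x : Int => x) false).getLast hS :=
    pairwise_le_getLast _ hS hpair mx hmxS
  have h2 : (PySem.List.sorted L (fun x : Int => x) false).getLast hS ≤ mx := hmax _ hlastmem
  simp [hmx, le_antisymm h2 h1]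

-- ===== VERDICT =====
theorem get_min_max_level_spec : Claim_equal_get_min_max_level := by
  intro sentences _ hpre
  unfold Spec_get_min_max_level get_min_max_level get_min_max_level_alt
  have hL : sentences.flatMap (fun sentence => sentence.map (fun morph => (morph.length : Int))) ≠ [] := by
    unfold Pre_get_min_max_level at hpre
    simpa [List.flatMap_eq_nil_iff] using hpre
  set L := sentences.flatMap (fun sentence => sentence.map (fun morph => (morph.length : Int))) with hLdef
  have hS : PySem.List.sorted L (fun x => x) false ≠ [] := by
    intro h
    have := PySem.List.length_sorted (xs := L) (key := fun x : Int => x) (rev := false)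
    rw [h] at this
    exact hL (List.eq_nil_of_length_eq_zero this.symm)
  rw [outer_eq, foldl_step_none _ hL]
  show ((PySem.List.min? L (fun x => x)).getD 0 - 1, (PySem.List.max? L (fun x => x)).getD 0 - 1)
      = (PySem.List.pyGetD (PySem.List.sorted L (fun x => x) false) 0 0 - 1,
         PySem.List.pyGetD (PySem.List.sorted L (fun x => x) false) (-1) 0 - 1)
  have hmax := sorted_last_eq_max? L hL hS
  have hneg : PySem.List.pyGetD (PySem.List.sorted L (fun x => x) false) (-1) 0
      = (PySem.List.sorted L (fun x => x) false).getLast hS :=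
    PySem.List.pyGetD_neg_one _ 0 hS
  obtain ⟨m, ts, hSdef⟩ := List.exists_cons_of_ne_nil hS
  have hmin := sorted_head_eq_min? L hL m ts hSdef
  rw [hneg, hmax, hSdef, PySem.List.pyGetD_zero_cons, ← hmin]
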